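-- pv_equiv track=rewrite | github.com/blueset/project-sekai-ctf-eana | encoding-fastHands/translation.py | format
-- ===== SOURCE A (Python) =====
-- chord = "STKPWHRAO*EUFRPBLGTSDZ"
--
-- def format(key):
--     placements = key.split("/")
--     ans = []
--     for p in placements:
--         p = list(p)
--         c = []
--         for key in chord:
--             if p and p[0] == "-" and key == "*":
--                 c.append(" ")
--                 p.pop(0)
--             elif p and p[0] == key:
--                 c.append(key)
--                 p.pop(0)
--             else:
--                 c.append(" ")
--         ans.append("".join(c) + "$")
--     return ans
-- ===== SOURCE B (Python) =====
-- chord = "STKPWHRAO*EUFRPBLGTSDZ"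
--
-- def format(key):
--     ans = []
--     for p in key.split("/"):
--         rest = chord
--         out = []
--         for ch in p:
--             pre, sep, tail = rest.partition("*" if ch == "-" else ch)
--             if not sep:
--                 break
--             out.append(" " * len(pre) + (" " if ch == "-" else ch))
--             rest = tail
--         ans.append("".join(out) + " " * len(rest) + "$")
--     return ans
-- ===== Notes on version B (the rewrite author's own statement) =====
-- stated objective: alternative
-- what changed: Instead of scanning all 22 chord keys per placement while popping matched placement chars, B loops over the placement's characters and partitions a shrinking suffix of the chord at each char's first occurrence, emitting the padding spaces and the trailing-suffix spaces directly.
import Mathlib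
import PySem

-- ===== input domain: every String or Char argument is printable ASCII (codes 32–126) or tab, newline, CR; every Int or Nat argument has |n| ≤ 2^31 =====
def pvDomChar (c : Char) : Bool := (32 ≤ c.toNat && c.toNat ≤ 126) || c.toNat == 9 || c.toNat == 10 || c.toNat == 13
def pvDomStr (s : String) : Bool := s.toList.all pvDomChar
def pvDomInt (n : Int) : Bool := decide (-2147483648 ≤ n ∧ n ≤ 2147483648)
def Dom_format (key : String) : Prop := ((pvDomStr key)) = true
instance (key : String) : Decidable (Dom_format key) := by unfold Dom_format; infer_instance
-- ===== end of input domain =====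

-- B replaces A's scan over all 22 chord keys (with pop(0)) by a loop over the
-- placement's own characters that partitions a shrinking suffix of the chord
-- (objective: alternative decomposition; same return value).

def chordStr : String := "STKPWHRAO*EUFRPBLGTSDZ"

-- ===== PORT A =====
-- one iteration of A's inner 'for key in chord' loop; state = (p, c)
def formatStep (st : List Char × List Char) (k : Char) : List Char × List Char :=
  match st with
  | (p, c) =>
    match p with
    | q :: qs =>
      if q = '-' ∧ k = '*' then (qs, c ++ [' '])
      else if q = k then (qs, c ++ [k])
      else (q :: qs, c ++ [' '])
    | [] => ([], c ++ [' '])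

def format (key : String) : List String :=
  (PySem.Chars.splitOn key.toList ['/']).map (fun p =>
    let st := chordStr.toList.foldl formatStep (p, [])
    String.mk (st.2 ++ ['$']))   -- "".join(c) + "$"

-- ===== PORT B =====
-- hand port of str.partition with a one-character separator (exact there:
-- pre / found-flag / tail at the first occurrence of t)
def partitionAt (t : Char) : List Char → List Char × Bool × List Char
  | [] => ([], false, [])
  | c :: cs =>
    if c = t then ([], true, cs)
    else
      let r := partitionAt t cs
      (c :: r.1, r.2.1, r.2.2)

-- B's inner loop over the placement's characters; on break or exhaustion the
-- trailing spaces for the unconsumed chord suffix are appended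
def formatAltLoop : List Char → List Char → List Char
  | [], rest => List.replicate rest.length ' '
  | ch :: ps, rest =>
    let r := partitionAt (if ch = '-' then '*' else ch) rest
    if r.2.1 then
      List.replicate r.1.length ' ' ++ [if ch = '-' then ' ' else ch] ++ formatAltLoop ps r.2.2
    else List.replicate rest.length ' '

def format_alt (key : String) : List String :=
  (PySem.Chars.splitOn key.toList ['/']).map (fun p =>
    String.mk (formatAltLoop p chordStr.toList ++ ['$']))

-- ===== PRECONDITION & SPEC =====
def Spec_format (key : String) (out : List String) : Prop := out = format_alt key
instance (key : String) (out : List String) : Decidable (Spec_format key out) := by unfold Spec_format; infer_instance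

-- ===== CLAIM (what is proved, stated in full; the proofs are below) =====
def Claim_equal_format : Prop := ∀ (key : String), Dom_format key → Spec_format key (format key)

-- ===== LEMMAS AND PROOFS =====

theorem formatAltLoop_nil (p : List Char) : formatAltLoop p [] = [] := by
  cases p <;> simp [formatAltLoop, partitionAt]

theorem foldA (ks : List Char) (h : '-' ∉ ks) : ∀ (p acc : List Char),
    (ks.foldl formatStep (p, acc)).2 = acc ++ formatAltLoop p ks := by
  induction ks with
  | nil => intro p acc; simp [formatAltLoop_nil]
  | cons k ks ih =>
    intro p acc
    have hk : k ≠ '-' := fun e => h (by simp [e])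
    have hks : '-' ∉ ks := fun e => h (List.mem_cons_of_mem _ e)
    cases p with
    | nil =>
      simp only [List.foldl_cons, formatStep]
      rw [ih hks [] (acc ++ [' '])]
      simp [formatAltLoop, List.replicate_succ]
    | cons q qs =>
      by_cases h1 : q = '-' ∧ k = '*'
      · simp only [List.foldl_cons, formatStep, if_pos h1]
        rw [ih hks qs (acc ++ [' '])]
        simp [formatAltLoop, partitionAt, h1.1, h1.2]
      · by_cases h2 : q = k
        · subst h2
          simp only [List.foldl_cons, formatStep, if_neg h1, if_pos trivial]
          rw [ih hks qs (acc ++ [q])]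
          simp [formatAltLoop, partitionAt, hk]
        · simp only [List.foldl_cons, formatStep, if_neg h1, if_neg h2]
          rw [ih hks (q :: qs) (acc ++ [' '])]
          have ht : ¬ k = (if q = '-' then '*' else q) := by
            by_cases hq : q = '-'
            · rw [if_pos hq]; exact fun e => h1 ⟨hq, e⟩
            · rw [if_neg hq]; exact fun e => h2 e.symm
          -- formatAltLoop (q::qs) (k::ks) = ' ' :: formatAltLoop (q::qs) ks
          have step : formatAltLoop (q :: qs) (k :: ks) = ' ' :: formatAltLoop (q :: qs) ks := by
            simp only [formatAltLoop, partitionAt, if_neg ht]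
            by_cases hf : (partitionAt (if q = '-' then '*' else q) ks).2.1
            · simp [hf, List.replicate_succ]
            · simp [hf, List.replicate_succ]
          rw [step]
          simp [List.append_assoc]

theorem format_eq_alt (key : String) : format key = format_alt key := by
  unfold format format_alt
  refine List.map_congr_left (fun p _ => ?_)
  have h : '-' ∉ chordStr.toList := by decide
  show String.mk ((List.foldl formatStep (p, []) chordStr.toList).2 ++ ['$']) = _
  rw [foldA chordStr.toList h p []]
  simp

-- ===== VERDICT (by name: the statement is the Claim_ definition above) =====
theorem format_spec : Claim_equal_format := by
  intro key _
  exact format_eq_alt key
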